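-- pv_equiv track=rewrite | github.com/luukhy/Fun-projects | img-search/sift.py | order_keypoints_by_layers
-- ===== SOURCE A (Python) =====
-- def order_keypoints_by_layers(keypoints: list):
--     keypoints_by_layers = {}
--     for kp in keypoints:
--         octave_idx, layer, y_pos, x_pos = kp
--         if (octave_idx, layer) not in keypoints_by_layers:
--             keypoints_by_layers[(octave_idx, layer)] = []
--         keypoints_by_layers[octave_idx, layer].append((y_pos, x_pos))
--
--     return keypoints_by_layers
-- ===== SOURCE B (Python) =====
-- def order_keypoints_by_layers(keypoints: list):
--     keys = dict.fromkeys((o, l) for (o, l, _, _) in keypoints)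
--     return {k: [(y, x) for (o, l, y, x) in keypoints if (o, l) == k]
--             for k in keys}
-- ===== Notes on version B (the rewrite author's own statement) =====
-- stated objective: idiomatic
-- what changed: Replaces the single-pass dict mutation (conditional empty-list insert plus in-place append) with a declarative two-phase build: dict.fromkeys for the ordered distinct keys, then a dict comprehension that materialises each group by filtering the input per key.
import Mathlib
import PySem

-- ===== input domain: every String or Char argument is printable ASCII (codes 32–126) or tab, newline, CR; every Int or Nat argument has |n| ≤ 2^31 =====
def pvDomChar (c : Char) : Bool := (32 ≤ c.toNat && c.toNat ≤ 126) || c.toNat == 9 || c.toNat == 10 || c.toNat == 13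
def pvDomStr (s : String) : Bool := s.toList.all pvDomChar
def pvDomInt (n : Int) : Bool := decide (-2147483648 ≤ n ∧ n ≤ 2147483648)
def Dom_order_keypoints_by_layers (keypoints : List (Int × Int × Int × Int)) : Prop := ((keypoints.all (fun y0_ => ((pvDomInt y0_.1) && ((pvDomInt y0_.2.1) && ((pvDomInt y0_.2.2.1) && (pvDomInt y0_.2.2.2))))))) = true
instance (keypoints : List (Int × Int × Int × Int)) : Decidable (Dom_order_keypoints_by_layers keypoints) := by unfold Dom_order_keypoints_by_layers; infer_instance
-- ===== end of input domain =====

-- B replaces A's single-pass dict mutation by an idiomatic two-phase build (ordered distinct keys, then one group comprehension per key); same result, no speed claim.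


-- ===== PORT A =====
-- Literal port of A: one fold over the keypoints maintaining the dict; the key is
-- always present when the append (modify) runs, so the default [] is never used.
def order_keypoints_by_layers (keypoints : List (Int × Int × Int × Int)) : List (Int × Int × List (Int × Int)) :=
  let d : PySem.Dict (Int × Int) (List (Int × Int)) :=
    keypoints.foldl (fun d kp =>
      let key := (kp.1, kp.2.1)
      let d := if d.contains key = true then d else d.insert key []
      d.modify key [] (fun v => v ++ [(kp.2.2.1, kp.2.2.2)])) PySem.Dict.empty
  d.items.map (fun p => (p.1.1, p.1.2, p.2))

-- ===== PORT B =====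
-- Port of B: ordered distinct keys via dict.fromkeys (= PySem.List.dedup), then a
-- dict comprehension filtering the input per key.
def order_keypoints_by_layers_alt (keypoints : List (Int × Int × Int × Int)) : List (Int × Int × List (Int × Int)) :=
  (PySem.List.dedup (keypoints.map (fun kp => (kp.1, kp.2.1)))).map
    (fun k => (k.1, k.2,
      (keypoints.filter (fun kp => (kp.1, kp.2.1) == k)).map (fun kp => (kp.2.2.1, kp.2.2.2))))

-- ===== PRECONDITION & SPEC =====
def Spec_order_keypoints_by_layers (keypoints : List (Int × Int × Int × Int)) (out : List (Int × Int × List (Int × Int))) : Prop := out = order_keypoints_by_layers_alt keypoints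
instance (keypoints : List (Int × Int × Int × Int)) (out : List (Int × Int × List (Int × Int))) : Decidable (Spec_order_keypoints_by_layers keypoints out) := by unfold Spec_order_keypoints_by_layers; infer_instance

-- ===== CLAIM (what is proved, stated in full; the proofs are below) =====
def Claim_equal_order_keypoints_by_layers : Prop := ∀ (keypoints : List (Int × Int × Int × Int)), Dom_order_keypoints_by_layers keypoints → Spec_order_keypoints_by_layers keypoints (order_keypoints_by_layers keypoints)

-- ===== LEMMAS AND PROOFS =====

-- get? finds a freshly appended pair when its key occurs nowhere earlier.
theorem pv_get?_append_fresh (items : List ((Int × Int) × List (Int × Int))) (k : Int × Int) (v : List (Int × Int))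
    (h : k ∉ items.map Prod.fst) :
    (PySem.Dict.mk (items ++ [(k, v)])).get? k = some v := by
  induction items with
  | nil => simp [PySem.Dict.get?]
  | cons p rest ih =>
    obtain ⟨pk, pv⟩ := p
    simp only [List.map_cons, List.mem_cons, not_or] at h
    have hne : (pk == k) = false := beq_eq_false_iff_ne.mpr (fun he => h.1 he.symm)
    rw [List.cons_append, PySem.Dict.get?_mk_cons, hne, if_neg (by simp)]
    exact ih h.2

-- A's "if missing, insert []; then append" step is exactly a modify with default [].
theorem pv_modify_insert_fresh (d : PySem.Dict (Int × Int) (List (Int × Int))) (k : Int × Int)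
    (f : List (Int × Int) → List (Int × Int)) (h : d.contains k = false) :
    (d.insert k []).modify k [] f = d.modify k [] f := by
  have hg : d.get? k = none := (PySem.Dict.get?_eq_none_iff_contains d k).mpr h
  have hk : k ∉ d.keys := by
    intro hm
    exact absurd ((PySem.Dict.contains_iff_mem_keys d k).mpr hm) (by simp [h])
  have hk' : k ∉ d.items.map Prod.fst := by simpa [PySem.Dict.keys] using hk
  have happ := pv_get?_append_fresh d.items k [] hk'
  simp [PySem.Dict.modify, PySem.Dict.insert, PySem.Dict.getD, h, happ, hg]
  have hid : ∀ p ∈ d.items, (if p.1 = k then (k, f []) else p) = p := by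
    intro p hp
    rw [if_neg]
    intro hpk
    exact absurd (hpk ▸ PySem.Dict.mem_keys_of_mem_items d hp) hk
  calc List.map (fun p => if p.1 = k then (k, f []) else p) d.items
      = d.items.map id := List.map_congr_left hid
    _ = d.items := List.map_id d.items

theorem order_keypoints_by_layers_spec : Claim_equal_order_keypoints_by_layers := by
  intro keypoints _
  unfold Spec_order_keypoints_by_layers order_keypoints_by_layers order_keypoints_by_layers_alt
  -- Step 1: A's loop body (conditional fresh insert, then append) is a plain modify.
  have hfun : (fun (d : PySem.Dict (Int × Int) (List (Int × Int))) (kp : Int × Int × Int × Int) =>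
      let key := (kp.1, kp.2.1)
      let d := if d.contains key = true then d else d.insert key []
      d.modify key [] (fun v => v ++ [(kp.2.2.1, kp.2.2.2)]))
      = (fun (d : PySem.Dict (Int × Int) (List (Int × Int))) (kp : Int × Int × Int × Int) =>
          d.modify (kp.1, kp.2.1) [] (fun v => v ++ [(kp.2.2.1, kp.2.2.2)])) := by
    funext d kp
    show (if d.contains (kp.1, kp.2.1) = true then d else d.insert (kp.1, kp.2.1) []).modify
        (kp.1, kp.2.1) [] (fun v => v ++ [(kp.2.2.1, kp.2.2.2)])
      = d.modify (kp.1, kp.2.1) [] (fun v => v ++ [(kp.2.2.1, kp.2.2.2)])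
    by_cases hc : d.contains (kp.1, kp.2.1) = true
    · rw [if_pos hc]
    · rw [if_neg hc]
      exact pv_modify_insert_fresh d (kp.1, kp.2.1) _ (by simpa using hc)
  rw [hfun]
  set d := keypoints.foldl (fun d kp =>
      d.modify (kp.1, kp.2.1) [] (fun v => v ++ [(kp.2.2.1, kp.2.2.2)])) PySem.Dict.empty with hd
  -- Step 2: the keys of d, in order, are the ordered-dedup of the keypoint keys.
  have hkeys : d.keys = PySem.List.dedup (keypoints.map (fun kp => (kp.1, kp.2.1))) := by
    rw [hd, PySem.Dict.keys_foldl_modify_key, PySem.List.dedup_eq_ofList]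
    simp [PySem.Dict.keys, PySem.Dict.empty, PySem.Set.update_nil_left]
  have hnd : d.keys.Nodup := by
    rw [hd]
    exact PySem.Dict.nodup_keys_foldl_modify_key keypoints (fun kp => (kp.1, kp.2.1)) []
      (fun _ kp => (fun v => v ++ [(kp.2.2.1, kp.2.2.2)])) PySem.Dict.empty (by simp)
  -- Step 3: each group is the filtered-and-projected input.
  have hgetD : ∀ k : Int × Int, d.getD k []
      = (keypoints.filter (fun kp => (kp.1, kp.2.1) == k)).map (fun kp => (kp.2.2.1, kp.2.2.2)) := by
    intro k
    have hfm : d = (keypoints.map (fun kp => ((kp.1, kp.2.1), (kp.2.2.1, kp.2.2.2)))).foldl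
        (fun d p => d.modify p.1 [] (fun v => v ++ [p.2])) PySem.Dict.empty := by
      rw [hd, List.foldl_map]
    rw [hfm, PySem.Dict.getD_foldl_modify_append]
    simp [List.filter_map, Function.comp_def]
  -- Step 4: items of a nodup-key dict are keys paired with their lookups.
  show (List.map (fun p => (p.1.1, p.1.2, p.2)) d.items) = _
  rw [PySem.Dict.items_eq_map_keys d hnd [], hkeys, List.map_map]
  apply List.map_congr_left
  intro k hk
  simp [hgetD k]
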